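-- pv_equiv track=rewrite | github.com/Maksim061994/x5-ner-service | datasets/processing_dataset_from_kaggle.py | _split_into_tokens
-- ===== SOURCE A (Python) =====
-- def _split_into_tokens(text):
--     """Разбивает текст на токены по пробелам"""
--     if not text:
--         return []
--
--     tokens = []
--     start = 0
--     for i, char in enumerate(text):
--         if char == ' ':
--             if start < i:
--                 tokens.append((start, i))
--             start = i + 1
--
--     if start < len(text):
--         tokens.append((start, len(text)))
--
--     return tokens
-- ===== SOURCE B (Python) =====
-- def _split_into_tokens(text):
--     """Разбивает текст на токены по пробелам"""
--     tokens = []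
--     pos = 0
--     for piece in text.split(' '):
--         if piece:
--             tokens.append((pos, pos + len(piece)))
--         pos += len(piece) + 1
--     return tokens
-- ===== Notes on version B (the rewrite author's own statement) =====
-- stated objective: simpler
-- what changed: B first splits the text on the single-space separator and then folds over the resulting pieces with a running offset, appending a span only for non-empty pieces, instead of A's single character scan that tracks the current token-start index and flushes a trailing token after the loop; the C-level str.split also makes B measurably faster.
import Mathlib
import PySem

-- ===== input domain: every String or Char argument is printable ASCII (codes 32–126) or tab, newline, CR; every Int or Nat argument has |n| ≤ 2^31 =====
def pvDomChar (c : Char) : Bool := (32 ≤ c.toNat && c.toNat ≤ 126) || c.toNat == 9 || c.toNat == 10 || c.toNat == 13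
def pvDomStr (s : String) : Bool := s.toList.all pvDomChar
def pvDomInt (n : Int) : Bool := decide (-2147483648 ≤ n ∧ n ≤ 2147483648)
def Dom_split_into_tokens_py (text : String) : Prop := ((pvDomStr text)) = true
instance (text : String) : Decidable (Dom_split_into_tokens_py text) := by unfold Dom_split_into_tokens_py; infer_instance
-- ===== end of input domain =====

-- B replaces A's single index-tracking character scan with a split-then-offset-accumulation
-- decomposition (split on ' ' first, then fold over the pieces with a running offset); objective: simpler.


-- ===== PORT A =====
-- A's loop body: for (i, char) in enumerate(text): if char == ' ' …
def stepA (st : List (Int × Int) × Int) (p : Int × Char) : List (Int × Int) × Int :=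
  if p.2 = ' ' then
    ((if st.2 < p.1 then st.1 ++ [(st.2, p.1)] else st.1), p.1 + 1)
  else st

def split_into_tokens_py (text : String) : List (Int × Int) :=
  if text.toList = [] then []
  else
    let st := (PySem.List.enumerate text.toList 0).foldl stepA ([], 0)
    if st.2 < (text.toList.length : Int) then st.1 ++ [(st.2, (text.toList.length : Int))]
    else st.1

-- ===== PORT B =====
-- B's loop body: for piece in text.split(' '): …  (text.split(' ') ported as toList.splitOn ' ',
-- exact for a one-character separator)
def stepB (st : List (Int × Int) × Int) (piece : List Char) : List (Int × Int) × Int :=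
  ((if piece ≠ [] then st.1 ++ [(st.2, st.2 + (piece.length : Int))] else st.1),
   st.2 + (piece.length : Int) + 1)

def split_into_tokens_py_alt (text : String) : List (Int × Int) :=
  ((text.toList.splitOn ' ').foldl stepB ([], 0)).1

-- ===== PRECONDITION & SPEC =====
def Spec_split_into_tokens_py (text : String) (out : List (Int × Int)) : Prop := out = split_into_tokens_py_alt text
instance (text : String) (out : List (Int × Int)) : Decidable (Spec_split_into_tokens_py text out) := by unfold Spec_split_into_tokens_py; infer_instance

-- ===== CLAIM (what is proved, stated in full; the proofs are below) =====
def Claim_equal_split_into_tokens_py : Prop := ∀ (text : String), Dom_split_into_tokens_py text → Spec_split_into_tokens_py text (split_into_tokens_py text)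

-- ===== LEMMAS AND PROOFS =====

-- A's scan of the suffix cs (absolute positions from n), followed by the trailing-token flush.
def fullA (cs : List Char) (n : Nat) (tokens : List (Int × Int)) (start : Int) : List (Int × Int) :=
  let st := (PySem.List.enumerate cs n).foldl stepA (tokens, start)
  if st.2 < (n : Int) + (cs.length : Int) then st.1 ++ [(st.2, (n : Int) + (cs.length : Int))]
  else st.1

-- Core invariant: A's scan from offset n with pending token start `start` equals B's fold over the
-- pieces of the suffix, except the FIRST piece's span begins at `start` (the pending token's start).
theorem fullA_eq (cs : List Char) : ∀ (n : Nat) (tokens : List (Int × Int)) (start : Int),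
    start ≤ (n : Int) →
    fullA cs n tokens start =
      ((cs.splitOn ' ').tail.foldl stepB
        ((if start < (n : Int) + (((cs.splitOn ' ').headI.length : Nat) : Int) then
            tokens ++ [(start, (n : Int) + (((cs.splitOn ' ').headI.length : Nat) : Int))]
          else tokens),
         (n : Int) + (((cs.splitOn ' ').headI.length : Nat) : Int) + 1)).1 := by
  induction cs with
  | nil =>
    intro n tokens start hle
    simp [fullA, PySem.List.enumerate, List.splitOn, List.splitOnP_nil]
  | cons c cs ih =>
    intro n tokens start hle
    by_cases hc : c = ' '
    · subst hc
      have h1 : fullA (' ' :: cs) n tokens start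
          = fullA cs (n + 1) (if start < (n : Int) then tokens ++ [(start, (n : Int))] else tokens) ((n : Int) + 1) := by
        simp [fullA, PySem.List.enumerate_cons, stepA]
        split_ifs <;> (try simp) <;> omega
      rw [h1, ih (n + 1) _ ((n : Int) + 1) (by push_cast; omega)]
      have hsp' : List.splitOn ' ' (' ' :: cs) = [] :: List.splitOn ' ' cs := by
        simp [List.splitOn, List.splitOnP_cons]
      rw [hsp']
      simp only [List.headI, List.tail_cons, List.length_nil, Nat.cast_zero, add_zero,
        Nat.cast_add, Nat.cast_one]
      rcases hsp : List.splitOn ' ' cs with _ | ⟨p, rest⟩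
      · exact absurd hsp (List.splitOnP_ne_nil _ _)
      · simp only [List.tail_cons, List.foldl_cons, stepB]
        by_cases hp0 : p = []
        · subst hp0
          simp
        · have hlt : (n : Int) + 1 < (n : Int) + 1 + (p.length : Int) := by
            rcases p with _ | ⟨a, q⟩
            · exact absurd rfl hp0
            · simp only [List.length_cons]; push_cast; omega
          rw [if_pos hlt, if_pos hp0]
    · have h1 : fullA (c :: cs) n tokens start = fullA cs (n + 1) tokens start := by
        simp [fullA, PySem.List.enumerate_cons, stepA, hc]
        ring_nf
      rw [h1, ih (n + 1) tokens start (by push_cast; omega)]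
      rcases hsp : List.splitOnP (fun x => x == ' ') cs with _ | ⟨p, rest⟩
      · exact absurd hsp (List.splitOnP_ne_nil _ _)
      · simp only [List.splitOn, List.splitOnP_cons, if_neg (by simp [hc] : ¬ ((c == ' ') = true)),
          hsp, List.modifyHead, List.tail_cons, List.headI]
        have e : (((n + 1 : Nat)) : Int) + (p.length : Int) = ((n : Int) + (((c :: p).length : Nat) : Int)) := by
          push_cast [List.length_cons]; ring
        rw [e]

-- ===== VERDICT (by name: the statement is the Claim_ definition above) =====
theorem split_into_tokens_py_spec : Claim_equal_split_into_tokens_py := by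
  intro text _
  unfold Spec_split_into_tokens_py split_into_tokens_py split_into_tokens_py_alt
  rcases htl : text.toList with _ | ⟨c, cs⟩
  · simp [List.splitOn, List.splitOnP_nil, stepB]
  · simp only [if_neg (by simp : ¬ (c :: cs = []))]
    have key := fullA_eq (c :: cs) 0 [] 0 (by norm_num)
    simp only [fullA, Nat.cast_zero, zero_add] at key
    rw [key]
    rcases hsp : (c :: cs).splitOn ' ' with _ | ⟨p, rest⟩
    · exact absurd hsp (List.splitOnP_ne_nil _ _)
    · simp only [List.tail_cons, List.headI, List.foldl_cons, stepB]
      rcases p with _ | ⟨a, q⟩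
      · norm_num
      · congr 2; simp
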